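-- pv_equiv track=rewrite | github.com/dddwsd/algorithm | codility/2017/2_socks_laundering.py | solution
-- ===== SOURCE A (Python) =====
-- from collections import defaultdict
--
-- def solution(K, C, D):
--     # write your code in Python 3.6
--     answer = 0
--     clean_count = defaultdict(int)
--     for clean in C:
--         clean_count[clean] += 1
--         if clean_count[clean] == 2:
--             answer += 1
--             clean_count[clean] = 0
--
--     dirty_count = defaultdict(int)
--     for dirty in D:
--         if K == 0:
--             break
--         if clean_count[dirty] == 1:
--             answer += 1
--             K -= 1
--             clean_count[dirty] = 0
--         else:
--             dirty_count[dirty] += 1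
--
--     if K > 0 :
--         dirty_socks = sorted(dirty_count.values(), reverse=True)
--         for item in dirty_socks:
--             num = min(K // 2, item // 2)
--             answer += num
--             K -= num * 2
--             if K < 2:
--                 break
--
--     return answer
-- ===== SOURCE B (Python) =====
-- from collections import Counter
--
-- def solution(K, C, D):
--     # Closed-form counting: no per-sock simulation, no sort.
--     cc = Counter(C)
--     answer = sum(v // 2 for v in cc.values())          # pairs already clean
--     singles = {c for c, v in cc.items() if v % 2 == 1} # colors with one clean sock left
--     dc = Counter(D)
--     matchable = sum(1 for c in dc if c in singles)     # dirty colors that can complete a clean single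
--     m = min(K, matchable)
--     answer += m
--     K -= m
--     if K > 0:
--         total = sum((v - (c in singles)) // 2 for c, v in dc.items())
--         answer += min(K // 2, total)
--     return answer
-- ===== Notes on version B (the rewrite author's own statement) =====
-- stated objective: simpler
-- what changed: Replaces A's per-sock simulation with early breaks plus a descending sort of dirty counts by three closed-form counts over Counters (clean pairs = sum(v//2), single-matches = min(K, #dirty colors with an odd clean count), dirty pairs = min(K'//2, remaining dirty pair capacity)); Pre_ restricts to the natural domain K >= 0 (K is a laundering budget), since for negative K A's value is an artefact of its 'if K == 0: break' guard never firing.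
-- outside the precondition, e.g. on solution(-1, [1], [1]): A returns 1, B returns -1
import Mathlib
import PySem

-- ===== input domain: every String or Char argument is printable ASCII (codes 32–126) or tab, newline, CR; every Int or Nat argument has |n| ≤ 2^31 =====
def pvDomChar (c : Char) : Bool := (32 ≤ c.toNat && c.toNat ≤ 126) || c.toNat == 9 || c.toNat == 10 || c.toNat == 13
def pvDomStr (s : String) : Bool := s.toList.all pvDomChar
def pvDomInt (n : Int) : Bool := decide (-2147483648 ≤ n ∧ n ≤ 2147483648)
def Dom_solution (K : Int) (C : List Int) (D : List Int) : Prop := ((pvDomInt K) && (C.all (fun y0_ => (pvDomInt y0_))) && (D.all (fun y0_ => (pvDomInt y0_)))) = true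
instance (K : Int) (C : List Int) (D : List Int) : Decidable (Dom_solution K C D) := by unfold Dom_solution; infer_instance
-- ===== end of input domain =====

-- B replaces A's per-sock simulation (with early breaks and a descending sort of the
-- leftover dirty counts) by three closed-form counts over Counters, on the natural
-- domain K ≥ 0 of the laundering budget.

-- ===== PORT A =====
-- first loop: `clean_count[clean] += 1; if clean_count[clean] == 2: answer += 1; clean_count[clean] = 0`
-- (defaultdict(int) reads are modelled by getD · 0; the default entries a bare read inserts never change any later lookup)
def solLoop1 : List Int → Int → PySem.Dict Int Int → Int × PySem.Dict Int Int
  | [], ans, cc => (ans, cc)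
  | c :: rest, ans, cc =>
    let cc1 := cc.insert c (cc.getD c 0 + 1)
    if cc1.getD c 0 == 2 then solLoop1 rest (ans + 1) (cc1.insert c 0)
    else solLoop1 rest ans cc1

-- second loop over D, with the `if K == 0: break` modelled by returning the state unchanged
def solLoop2 : List Int → Int → Int → PySem.Dict Int Int → PySem.Dict Int Int →
    Int × Int × PySem.Dict Int Int × PySem.Dict Int Int
  | [], ans, K, cc, dd => (ans, K, cc, dd)
  | d :: rest, ans, K, cc, dd =>
    if K == 0 then (ans, K, cc, dd)
    else if cc.getD d 0 == 1 then solLoop2 rest (ans + 1) (K - 1) (cc.insert d 0) dd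
    else solLoop2 rest ans K cc (dd.insert d (dd.getD d 0 + 1))

-- third loop over the sorted dirty counts, with the `if K < 2: break`
def solLoop3 : List Int → Int → Int → Int
  | [], ans, _ => ans
  | item :: rest, ans, K =>
    let num := min (PySem.Int.floordiv K 2) (PySem.Int.floordiv item 2)
    if K - num * 2 < 2 then ans + num else solLoop3 rest (ans + num) (K - num * 2)

def solution (K : Int) (C : List Int) (D : List Int) : Int :=
  let p1 := solLoop1 C 0 PySem.Dict.empty
  let p2 := solLoop2 D p1.1 K p1.2 PySem.Dict.empty
  if 0 < p2.2.1 then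
    solLoop3 (PySem.List.sorted p2.2.2.2.values (fun x => x) true) p2.1 p2.2.1
  else p2.1

-- ===== PORT B =====
def solution_alt (K : Int) (C : List Int) (D : List Int) : Int :=
  let cc := PySem.Dict.counter C
  let answer := (cc.values.map (fun v => PySem.Int.floordiv v 2)).sum
  -- `{c for c, v in cc.items() if v % 2 == 1}` — counter keys are distinct, so the list is the set
  let singles := (cc.items.filter (fun p => PySem.Int.mod p.2 2 == 1)).map Prod.fst
  let dc := PySem.Dict.counter D
  let matchable : Int := ((dc.keys.filter (fun c => decide (c ∈ singles))).length : Int)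
  let m := min K matchable
  let answer2 := answer + m
  let K2 := K - m
  if 0 < K2 then
    answer2 + min (PySem.Int.floordiv K2 2)
      ((dc.items.map (fun p => PySem.Int.floordiv (p.2 - (if p.1 ∈ singles then 1 else 0)) 2)).sum)
  else answer2

-- ===== PRECONDITION & SPEC =====
-- Pre_ restricts to the natural domain of the task: K is a laundering budget, so K ≥ 0.
-- (For K < 0 A's `if K == 0: break` guard never fires, an artefact of its simulation.)
def Pre_solution (K : Int) (C : List Int) (D : List Int) : Prop := 0 ≤ K
instance (K : Int) (C : List Int) (D : List Int) : Decidable (Pre_solution K C D) := by unfold Pre_solution; infer_instance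
def pvWitness_solution : Int × List Int × List Int := (5, [1, 1, 2], [2, 3, 3])
def Spec_solution (K : Int) (C : List Int) (D : List Int) (out : Int) : Prop := out = solution_alt K C D
instance (K : Int) (C : List Int) (D : List Int) (out : Int) : Decidable (Spec_solution K C D out) := by unfold Spec_solution; infer_instance

-- ===== CLAIM (what is proved, stated in full; the proofs are below) =====
def Claim_equal_solution : Prop := ∀ (K : Int) (C : List Int) (D : List Int), Dom_solution K C D → Pre_solution K C D → Spec_solution K C D (solution K C D)

-- ===== LEMMAS AND PROOFS =====

-- integer count of occurrences
def cntI (L : List Int) (c : Int) : Int := (L.count c : Int)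

-- number of colors of Dl with a leftover clean single in cc
def elig (cc : PySem.Dict Int Int) (Dl : List Int) : Int :=
  ((Dl.toFinset.filter (fun x => cc.getD x 0 = 1)).card : Int)

-- matches performed by A's second loop (for a nonnegative budget K)
def m2 (K : Int) (cc : PySem.Dict Int Int) (Dl : List Int) : Int :=
  min K (elig cc Dl)

lemma getD_zero_of_not_mem_keys (d : PySem.Dict Int Int) (k : Int) (h : k ∉ d.keys) :
    d.getD k 0 = 0 := by
  simp [PySem.Dict.getD, (PySem.Dict.get?_eq_none_iff_not_mem_keys d k).2 h]

lemma finset_ofList_toFinset (L : List Int) : (PySem.Set.ofList L).toFinset = L.toFinset := by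
  ext x; simp [List.mem_toFinset, PySem.Set.mem_ofList]

lemma sum_ofList (f : Int → Int) (L : List Int) :
    ((PySem.Set.ofList L).map f).sum = ∑ x ∈ L.toFinset, f x := by
  rw [← List.sum_toFinset f (PySem.Set.nodup_ofList L), finset_ofList_toFinset]

lemma loop1_getD (C : List Int) : ∀ (ans : Int) (cc : PySem.Dict Int Int),
    (∀ c, cc.getD c 0 = 0 ∨ cc.getD c 0 = 1) →
    ∀ c, (solLoop1 C ans cc).2.getD c 0 = (cc.getD c 0 + cntI C c) % 2 := by
  induction C with
  | nil => intro ans cc h c; simp only [solLoop1, cntI, List.count_nil]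
           rcases h c with h0 | h0 <;> simp [h0]
  | cons d rest ih =>
    intro ans cc h c
    simp only [solLoop1, PySem.Dict.getD_insert]
    rcases h d with h0 | h0
    · rw [if_neg (by simp [h0])]
      rw [ih _ _ (by intro x; by_cases hx : x = d <;> simp [PySem.Dict.getD_insert, hx, h0, h x])]
      by_cases hc : c = d <;>
        simp [PySem.Dict.getD_insert, hc, cntI, List.count_cons, h0] <;> omega
    · rw [if_pos (by simp [h0])]
      rw [ih _ _ (by intro x; by_cases hx : x = d <;> simp [PySem.Dict.getD_insert, hx, h x])]
      by_cases hc : c = d <;>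
        simp [PySem.Dict.getD_insert, hc, cntI, List.count_cons, h0] <;> omega



lemma loop1_ans (C : List Int) : ∀ (ans : Int) (cc : PySem.Dict Int Int),
    (∀ c, cc.getD c 0 = 0 ∨ cc.getD c 0 = 1) →
    (solLoop1 C ans cc).1 = ans + ∑ x ∈ C.toFinset, (cc.getD x 0 + cntI C x) / 2 := by
  induction C with
  | nil => intro ans cc h; simp [solLoop1]
  | cons d rest ih =>
    intro ans cc h
    simp only [solLoop1, PySem.Dict.getD_insert]
    have hcnt : ∀ x : Int, x ≠ d → cntI (d :: rest) x = cntI rest x := by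
      intro x hx; simp [cntI, Ne.symm hx]
    have hcntd : cntI (d :: rest) d = cntI rest d + 1 := by
      simp [cntI]
    have hnn : 0 ≤ cntI rest d := by simp [cntI]
    by_cases hd : d ∈ rest.toFinset
    · have hins : (d :: rest).toFinset = rest.toFinset := by
        simp [List.toFinset_cons, Finset.insert_eq_self.2 hd]
      rcases h d with h0 | h0
      · rw [if_neg (by simp [h0])]
        rw [ih _ _ (by intro x; by_cases hx : x = d <;> simp [PySem.Dict.getD_insert, hx, h0, h x])]
        rw [hins, ← Finset.add_sum_erase _ _ hd, ← Finset.add_sum_erase _ (fun x => (cc.getD x 0 + cntI (d :: rest) x) / 2) hd]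
        have hs : ∑ x ∈ rest.toFinset.erase d, ((cc.insert d (cc.getD d 0 + 1)).getD x 0 + cntI rest x) / 2
            = ∑ x ∈ rest.toFinset.erase d, (cc.getD x 0 + cntI (d :: rest) x) / 2 :=
          Finset.sum_congr rfl (fun x hx => by
            have hxd : x ≠ d := (Finset.mem_erase.1 hx).1
            simp [PySem.Dict.getD_insert, hxd, hcnt x hxd])
        rw [hs]
        have h1 : ((cc.insert d (cc.getD d 0 + 1)).getD d 0 + cntI rest d)
            = (cc.getD d 0 + cntI (d :: rest) d) := by
          simp [hcntd, h0]; ring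
        omega
      · rw [if_pos (by simp [h0])]
        rw [ih _ _ (by intro x; by_cases hx : x = d <;> simp [PySem.Dict.getD_insert, hx, h x])]
        rw [hins, ← Finset.add_sum_erase _ _ hd, ← Finset.add_sum_erase _ (fun x => (cc.getD x 0 + cntI (d :: rest) x) / 2) hd]
        have hs : ∑ x ∈ rest.toFinset.erase d, (((cc.insert d (cc.getD d 0 + 1)).insert d 0).getD x 0 + cntI rest x) / 2
            = ∑ x ∈ rest.toFinset.erase d, (cc.getD x 0 + cntI (d :: rest) x) / 2 :=
          Finset.sum_congr rfl (fun x hx => by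
            have hxd : x ≠ d := (Finset.mem_erase.1 hx).1
            simp [PySem.Dict.getD_insert, hxd, hcnt x hxd])
        rw [hs]
        have h1 : (((cc.insert d (cc.getD d 0 + 1)).insert d 0).getD d 0 + cntI rest d) = cntI rest d := by
          simp
        have h2 : (cc.getD d 0 + cntI (d :: rest) d) = cntI rest d + 2 := by
          rw [hcntd, h0]; ring
        omega
    · have hd' : d ∉ rest := fun hm => hd (List.mem_toFinset.2 hm)
      have hc0 : cntI rest d = 0 := by simp [cntI, List.count_eq_zero.2 hd']
      rw [List.toFinset_cons]
      rcases h d with h0 | h0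
      · rw [if_neg (by simp [h0])]
        rw [ih _ _ (by intro x; by_cases hx : x = d <;> simp [PySem.Dict.getD_insert, hx, h0, h x])]
        rw [Finset.sum_insert hd]
        have hs : ∑ x ∈ rest.toFinset, ((cc.insert d (cc.getD d 0 + 1)).getD x 0 + cntI rest x) / 2
            = ∑ x ∈ rest.toFinset, (cc.getD x 0 + cntI (d :: rest) x) / 2 :=
          Finset.sum_congr rfl (fun x hx => by
            have hxd : x ≠ d := fun he => hd (he ▸ hx)
            simp [PySem.Dict.getD_insert, hxd, hcnt x hxd])
        rw [hs]
        have h1 : (cc.getD d 0 + cntI (d :: rest) d) = 1 := by rw [hcntd, h0, hc0]; ring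
        omega
      · rw [if_pos (by simp [h0])]
        rw [ih _ _ (by intro x; by_cases hx : x = d <;> simp [PySem.Dict.getD_insert, hx, h x])]
        rw [Finset.sum_insert hd]
        have hs : ∑ x ∈ rest.toFinset, (((cc.insert d (cc.getD d 0 + 1)).insert d 0).getD x 0 + cntI rest x) / 2
            = ∑ x ∈ rest.toFinset, (cc.getD x 0 + cntI (d :: rest) x) / 2 :=
          Finset.sum_congr rfl (fun x hx => by
            have hxd : x ≠ d := fun he => hd (he ▸ hx)
            simp [PySem.Dict.getD_insert, hxd, hcnt x hxd])
        rw [hs]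
        have h1 : (cc.getD d 0 + cntI (d :: rest) d) = 2 := by rw [hcntd, h0, hc0]; ring
        omega

lemma elig_nonneg (cc : PySem.Dict Int Int) (Dl : List Int) : 0 ≤ elig cc Dl := by
  simp [elig]

lemma elig_cons_match (cc : PySem.Dict Int Int) (d : Int) (rest : List Int)
    (h : cc.getD d 0 = 1) : elig cc (d :: rest) = elig (cc.insert d 0) rest + 1 := by
  unfold elig
  rw [List.toFinset_cons, Finset.filter_insert, if_pos h]
  have hset : rest.toFinset.filter (fun x => (cc.insert d 0).getD x 0 = 1)
      = (rest.toFinset.filter (fun x => cc.getD x 0 = 1)).erase d := by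
    ext x
    by_cases hx : x = d <;> simp [Finset.mem_filter, Finset.mem_erase, hx, PySem.Dict.getD_insert]
  rw [hset]
  have : insert d (rest.toFinset.filter (fun x => cc.getD x 0 = 1))
      = insert d ((rest.toFinset.filter (fun x => cc.getD x 0 = 1)).erase d) := by
    ext x; by_cases hx : x = d <;> simp [hx]
  rw [this, Finset.card_insert_of_notMem (Finset.notMem_erase _ _)]
  push_cast; ring

lemma elig_cons_nomatch (cc : PySem.Dict Int Int) (d : Int) (rest : List Int)
    (h : ¬ cc.getD d 0 = 1) : elig cc (d :: rest) = elig cc rest := by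
  unfold elig
  rw [List.toFinset_cons, Finset.filter_insert, if_neg h]

lemma m2_cons_match (K : Int) (cc : PySem.Dict Int Int) (d : Int) (rest : List Int)
    (h : cc.getD d 0 = 1) (hK0 : 0 ≤ K) (hK : K ≠ 0) :
    m2 K cc (d :: rest) = 1 + m2 (K - 1) (cc.insert d 0) rest := by
  have he := elig_cons_match cc d rest h
  have hnn := elig_nonneg (cc.insert d 0) rest
  unfold m2
  rw [he]
  rcases le_total K (elig (cc.insert d 0) rest + 1) with h2 | h2 <;> omega

lemma loop2_main (Dl : List Int) : ∀ (ans K : Int) (cc dd : PySem.Dict Int Int), 0 ≤ K →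
    (solLoop2 Dl ans K cc dd).1 = ans + m2 K cc Dl ∧
    (solLoop2 Dl ans K cc dd).2.1 = K - m2 K cc Dl := by
  induction Dl with
  | nil => intro ans K cc dd hK0; simp [solLoop2, m2, elig]; omega
  | cons d rest ih =>
    intro ans K cc dd hK0
    by_cases hK : K = 0
    · subst hK
      have h0 : m2 0 cc (d :: rest) = 0 := by
        have := elig_nonneg cc (d :: rest); simp [m2]; omega
      simp [solLoop2, h0]
    · rw [show solLoop2 (d :: rest) ans K cc dd
          = if cc.getD d 0 == 1 then solLoop2 rest (ans + 1) (K - 1) (cc.insert d 0) dd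
            else solLoop2 rest ans K cc (dd.insert d (dd.getD d 0 + 1)) by
        simp [solLoop2, hK]]
      by_cases hm : cc.getD d 0 = 1
      · rw [if_pos (by simp [hm])]
        have h2 := m2_cons_match K cc d rest hm hK0 hK
        obtain ⟨h3, h4⟩ := ih (ans + 1) (K - 1) (cc.insert d 0) dd (by omega)
        constructor
        · rw [h3, h2]; ring
        · rw [h4, h2]; ring
      · rw [if_neg (by simp [hm])]
        have h2 : m2 K cc (d :: rest) = m2 K cc rest := by
          unfold m2; rw [elig_cons_nomatch cc d rest hm]
        obtain ⟨h3, h4⟩ := ih ans K cc (dd.insert d (dd.getD d 0 + 1)) hK0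
        rw [h3, h4, h2]; exact ⟨rfl, rfl⟩

lemma loop2_dd (Dl : List Int) : ∀ (ans K : Int) (cc dd : PySem.Dict Int Int), 0 ≤ K →
    0 < K - m2 K cc Dl →
    ∀ c, (solLoop2 Dl ans K cc dd).2.2.2.getD c 0 =
      dd.getD c 0 + cntI Dl c - (if c ∈ Dl ∧ cc.getD c 0 = 1 then 1 else 0) := by
  induction Dl with
  | nil => intro ans K cc dd hK0 h c; simp [solLoop2, cntI]
  | cons d rest ih =>
    intro ans K cc dd hK0 h c
    by_cases hK : K = 0
    · exfalso; subst hK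
      have := elig_nonneg cc (d :: rest)
      simp [m2] at h; omega
    · rw [show solLoop2 (d :: rest) ans K cc dd
          = if cc.getD d 0 == 1 then solLoop2 rest (ans + 1) (K - 1) (cc.insert d 0) dd
            else solLoop2 rest ans K cc (dd.insert d (dd.getD d 0 + 1)) by
        simp [solLoop2, hK]]
      by_cases hm : cc.getD d 0 = 1
      · rw [if_pos (by simp [hm])]
        have h2 := m2_cons_match K cc d rest hm hK0 hK
        have h' : 0 < (K - 1) - m2 (K - 1) (cc.insert d 0) rest := by omega
        rw [ih (ans + 1) (K - 1) (cc.insert d 0) dd (by omega) h' c]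
        by_cases hc : c = d
        · subst hc
          simp [hm, cntI]
          ring
        · simp [PySem.Dict.getD_insert, hc, cntI, Ne.symm hc]
      · rw [if_neg (by simp [hm])]
        have h2 : m2 K cc (d :: rest) = m2 K cc rest := by
          unfold m2; rw [elig_cons_nomatch cc d rest hm]
        rw [ih ans K cc (dd.insert d (dd.getD d 0 + 1)) hK0 (by omega) c]
        by_cases hc : c = d
        · subst hc
          simp [hm, cntI]
          ring
        · simp [PySem.Dict.getD_insert, hc, cntI, Ne.symm hc]

lemma loop2_keys (Dl : List Int) : ∀ (ans K : Int) (cc dd : PySem.Dict Int Int),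
    dd.keys.Nodup →
    (solLoop2 Dl ans K cc dd).2.2.2.keys.Nodup ∧
    (∀ c, c ∈ (solLoop2 Dl ans K cc dd).2.2.2.keys → c ∈ dd.keys ∨ c ∈ Dl) := by
  induction Dl with
  | nil =>
    intro ans K cc dd h
    refine ⟨by simpa [solLoop2] using h, fun c hc => ?_⟩
    simp [solLoop2] at hc; simp [hc]
  | cons d rest ih =>
    intro ans K cc dd h
    by_cases hK : K = 0
    · subst hK
      refine ⟨by simpa [solLoop2] using h, fun c hc => ?_⟩
      simp [solLoop2] at hc; simp [hc]
    · rw [show solLoop2 (d :: rest) ans K cc dd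
          = if cc.getD d 0 == 1 then solLoop2 rest (ans + 1) (K - 1) (cc.insert d 0) dd
            else solLoop2 rest ans K cc (dd.insert d (dd.getD d 0 + 1)) by
        simp [solLoop2, hK]]
      by_cases hm : cc.getD d 0 = 1
      · rw [if_pos (by simp [hm])]
        obtain ⟨h1, h2⟩ := ih (ans + 1) (K - 1) (cc.insert d 0) dd h
        exact ⟨h1, fun c hc => by rcases h2 c hc with h3 | h3 <;> simp [h3]⟩
      · rw [if_neg (by simp [hm])]
        obtain ⟨h1, h2⟩ := ih ans K cc (dd.insert d (dd.getD d 0 + 1))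
          (PySem.Dict.nodup_keys_insert dd d _ h)
        refine ⟨h1, fun c hc => ?_⟩
        rcases h2 c hc with h3 | h3
        · rcases (PySem.Dict.mem_keys_insert dd d c _).1 h3 with h4 | h4 <;> simp [h4]
        · simp [h3]

lemma loop3_spec (vals : List Int) : ∀ (ans K : Int), 0 < K → (∀ v ∈ vals, 0 ≤ v) →
    solLoop3 vals ans K = ans + min (K / 2) ((vals.map (fun v => v / 2)).sum) := by
  induction vals with
  | nil => intro ans K hK _; simp [solLoop3]; omega
  | cons item rest ih =>
    intro ans K hK hnn
    have hi : 0 ≤ item := hnn item (by simp)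
    have hR : 0 ≤ ((rest.map (fun v => v / 2)).sum) :=
      List.sum_nonneg (by intro x hx
                          obtain ⟨v, hv, rfl⟩ := List.mem_map.1 hx
                          exact Int.ediv_nonneg (hnn v (by simp [hv])) (by norm_num))
    rw [show solLoop3 (item :: rest) ans K
        = (if K - (min (K / 2) (item / 2)) * 2 < 2 then ans + min (K / 2) (item / 2)
           else solLoop3 rest (ans + min (K / 2) (item / 2)) (K - (min (K / 2) (item / 2)) * 2)) by
      simp [solLoop3]]
    simp only [List.map_cons, List.sum_cons]
    rcases le_total (K / 2) (item / 2) with hmin | hmin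
    · rw [min_eq_left hmin]
      rw [if_pos (by omega)]
      have : min (K / 2) (item / 2 + (rest.map (fun v => v / 2)).sum) = K / 2 := by omega
      omega
    · rw [min_eq_right hmin]
      by_cases hbr : K - (item / 2) * 2 < 2
      · rw [if_pos hbr]
        have h2 : K / 2 = item / 2 := by omega
        have : min (K / 2) (item / 2 + (rest.map (fun v => v / 2)).sum) = item / 2 := by omega
        omega
      · rw [if_neg hbr]
        rw [ih (ans + item / 2) (K - (item / 2) * 2) (by omega)
            (fun v hv => hnn v (by simp [hv]))]
        have h3 : (K - (item / 2) * 2) / 2 = K / 2 - item / 2 := by omega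
        rw [h3]
        have h4 : 0 ≤ item / 2 := Int.ediv_nonneg hi (by norm_num)
        rcases le_total (K / 2 - item / 2) ((rest.map (fun v => v / 2)).sum) with h5 | h5 <;> omega


-- ===== VERDICT (by name: the statement is the Claim_ definition above) =====
theorem solution_spec : Claim_equal_solution := by
  unfold Claim_equal_solution Spec_solution
  intro K C D _ hK0
  replace hK0 : (0:Int) ≤ K := hK0
  have h01 : ∀ c : Int, (PySem.Dict.empty : PySem.Dict Int Int).getD c 0 = 0 ∨
      (PySem.Dict.empty : PySem.Dict Int Int).getD c 0 = 1 :=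
    fun c => Or.inl (PySem.Dict.getD_empty c 0)
  have ha1 : (solLoop1 C 0 PySem.Dict.empty).1 = ∑ x ∈ C.toFinset, cntI C x / 2 := by
    rw [loop1_ans C 0 _ h01]; simp [PySem.Dict.getD_empty]
  have hcc1 : ∀ c, (solLoop1 C 0 PySem.Dict.empty).2.getD c 0 = cntI C c % 2 := by
    intro c; rw [loop1_getD C 0 _ h01 c]; simp [PySem.Dict.getD_empty]
  have hsingle : ∀ c : Int,
      c ∈ (((PySem.Dict.counter C).items.filter
          (fun p => PySem.Int.mod p.2 2 == 1)).map Prod.fst) ↔ cntI C c % 2 = 1 := by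
    intro c
    simp only [PySem.Dict.items_counter, List.mem_map, List.mem_filter]
    constructor
    · rintro ⟨p, ⟨⟨k, hk, rfl⟩, hmod⟩, hfst⟩
      simp only at hfst
      subst hfst
      simpa [cntI, PySem.Int.mod_eq_emod_of_pos (show (0:Int) < 2 by norm_num)] using hmod
    · intro hm
      have hcpos : c ∈ C := by
        by_contra hnc
        rw [show cntI C c = 0 by simp [cntI, List.count_eq_zero.2 hnc]] at hm
        norm_num at hm
      refine ⟨(c, (List.count c C : Int)), ⟨⟨c, (PySem.Set.mem_ofList C c).2 hcpos, rfl⟩, ?_⟩, rfl⟩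
      simpa [PySem.Int.mod_eq_emod_of_pos (show (0:Int) < 2 by norm_num)] using hm
  have hmatch : ((((PySem.Dict.counter D).keys.filter
      (fun c => decide (c ∈ (((PySem.Dict.counter C).items.filter
          (fun p => PySem.Int.mod p.2 2 == 1)).map Prod.fst)))).length : Int))
      = elig (solLoop1 C 0 PySem.Dict.empty).2 D := by
    rw [PySem.Dict.keys_counter]
    have hnd2 : ((PySem.Set.ofList D).filter (fun c => decide (c ∈ (((PySem.Dict.counter C).items.filter
          (fun p => PySem.Int.mod p.2 2 == 1)).map Prod.fst)))).Nodup :=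
      (PySem.Set.nodup_ofList D).filter _
    rw [← List.toFinset_card_of_nodup hnd2, List.toFinset_filter, finset_ofList_toFinset]
    unfold elig
    norm_cast
    congr 1
    ext x
    simp only [Finset.mem_filter, decide_eq_true_eq, hsingle x, hcc1 x]
  have hBans : (((PySem.Dict.counter C).values.map (fun v => PySem.Int.floordiv v 2)).sum)
      = ∑ x ∈ C.toFinset, cntI C x / 2 := by
    rw [PySem.Dict.values_eq_map_keys _ (PySem.Dict.nodup_keys_counter C) 0,
        PySem.Dict.keys_counter, List.map_map]
    rw [show ((fun v => PySem.Int.floordiv v 2) ∘ fun k => (PySem.Dict.counter C).getD k 0)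
        = fun k => cntI C k / 2 from funext fun k => by
      simp [PySem.Dict.getD_counter, cntI]]
    exact sum_ofList _ C
  obtain ⟨hans2, hK2⟩ :=
    loop2_main D (solLoop1 C 0 PySem.Dict.empty).1 K (solLoop1 C 0 PySem.Dict.empty).2
      PySem.Dict.empty hK0
  simp only [solution, solution_alt]
  rw [hmatch, hK2, hans2, ha1, hBans]
  have hm2 : min K (elig (solLoop1 C 0 PySem.Dict.empty).2 D)
      = m2 K (solLoop1 C 0 PySem.Dict.empty).2 D := rfl
  rw [hm2]
  split_ifs with hpos
  · -- the third stage runs on both sides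
    have hkeys := loop2_keys D (∑ x ∈ C.toFinset, cntI C x / 2) K
      (solLoop1 C 0 PySem.Dict.empty).2 PySem.Dict.empty (by simp [PySem.Dict.keys_empty])
    obtain ⟨hnd, hsub'⟩ := hkeys
    set dd := (solLoop2 D (∑ x ∈ C.toFinset, cntI C x / 2) K
      (solLoop1 C 0 PySem.Dict.empty).2 PySem.Dict.empty).2.2.2 with hdd0
    have hsub : ∀ c ∈ dd.keys, c ∈ D := by
      intro c hc
      rcases hsub' c hc with h | h
      · simp [PySem.Dict.keys_empty] at h
      · exact h
    have hddv := loop2_dd D (∑ x ∈ C.toFinset, cntI C x / 2) K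
      (solLoop1 C 0 PySem.Dict.empty).2 PySem.Dict.empty hK0 hpos
    have hgd : ∀ c, dd.getD c 0 = cntI D c -
        (if c ∈ D ∧ (solLoop1 C 0 PySem.Dict.empty).2.getD c 0 = 1 then 1 else 0) := by
      intro c; rw [← hdd0] at hddv; rw [hddv c]; simp [PySem.Dict.getD_empty]
    have hcnt1 : ∀ c ∈ D, (1:Int) ≤ cntI D c := by
      intro c hc
      have h0 : 0 < List.count c D := List.count_pos_iff.mpr hc
      simp only [cntI]; exact_mod_cast h0
    have hvals : dd.values = dd.keys.map (fun k => dd.getD k 0) :=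
      PySem.Dict.values_eq_map_keys dd hnd 0
    have hnnv : ∀ v ∈ PySem.List.sorted dd.values (fun x => x) true, 0 ≤ v := by
      intro v hv
      rw [PySem.List.mem_sorted, hvals] at hv
      obtain ⟨c, hc, rfl⟩ := List.mem_map.1 hv
      rw [hgd c]
      have h1 := hcnt1 c (hsub c hc)
      split_ifs <;> omega
    rw [loop3_spec _ _ _ hpos hnnv]
    congr 1
    rw [PySem.Int.floordiv_eq_ediv_of_pos (show (0:Int) < 2 by norm_num)]
    congr 1
    have hperm : ((PySem.List.sorted dd.values (fun x => x) true).map (fun v => v / 2)).sum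
        = (dd.values.map (fun v => v / 2)).sum :=
      ((PySem.List.sorted_perm dd.values (fun x => x) true).map _).sum_eq
    rw [hperm, hvals, List.map_map, ← List.sum_toFinset _ hnd]
    rw [Finset.sum_subset (fun x hx => List.mem_toFinset.2 (hsub x (List.mem_toFinset.1 hx)))
      (fun x _ hx => by
        simp [Function.comp, getD_zero_of_not_mem_keys dd x (fun hm => hx (List.mem_toFinset.2 hm))])]
    rw [PySem.Dict.items_counter D, List.map_map, sum_ofList]
    refine Finset.sum_congr rfl (fun c hc => ?_)
    have hcD : c ∈ D := List.mem_toFinset.1 hc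
    simp only [Function.comp]
    rw [hgd c]
    rw [PySem.Int.floordiv_eq_ediv_of_pos (show (0:Int) < 2 by norm_num)]
    by_cases hodd : cntI C c % 2 = 1
    · rw [if_pos ⟨hcD, by rw [hcc1 c]; exact hodd⟩, if_pos ((hsingle c).2 hodd)]
      simp [cntI]
    · rw [if_neg (fun hand => hodd (by rw [← hcc1 c]; exact hand.2)),
          if_neg (fun hmem => hodd ((hsingle c).1 hmem))]
      simp [cntI]
  · rfl
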